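-- pv_equiv track=rewrite | github.com/pypi-data/pypi-mirror-367 | packages/rithmetic/rithmetic-0.0.18-py3-none-any.whl/rithmetic/Base.py | dectob3
-- ===== SOURCE A (Python) =====
-- def dectob3(num):
--     try:
--         num = int(num)
--     except:
--         return 'Invalid number'
--     if num < 0:
--         return 'Invalid number'
--     else:
--         diff = 10 - 3
--         N = int(num / 3)
--         val = (N * diff)
--         p = 1
--         while N > 0:
--             N = int(N / 3)
--             val = val + (N * diff * (10 ** p))
--             p = p + 1
--         ans = num + val
--         return ans
-- ===== SOURCE B (Python) =====
-- def dectob3(num):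
--     try:
--         num = int(num)
--     except:
--         return 'Invalid number'
--     if num < 0:
--         return 'Invalid number'
--     # phase 1: collect base-3 digits, least significant first
--     digits = []
--     n = num
--     while n > 0:
--         digits.append(n % 3)
--         n //= 3
--     # phase 2: fold the digits most-significant-first into a decimal readout
--     result = 0
--     for d in reversed(digits):
--         result = result * 10 + d
--     return result
-- ===== Notes on version B (the rewrite author's own statement) =====
-- stated objective: idiomatic
-- what changed: B replaces A's single loop that sums 7*floor(num/3^k) shifted prefixes (relying on 10-3=7 telescoping) with a textbook two-phase conversion: first collect the base-3 digits low-to-high into a list, then fold the reversed list into the decimal readout with result = result*10 + d.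
-- outside the precondition, e.g. on dectob3(-1): A returns 'Invalid number', B returns 'Invalid number'
import Mathlib
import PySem

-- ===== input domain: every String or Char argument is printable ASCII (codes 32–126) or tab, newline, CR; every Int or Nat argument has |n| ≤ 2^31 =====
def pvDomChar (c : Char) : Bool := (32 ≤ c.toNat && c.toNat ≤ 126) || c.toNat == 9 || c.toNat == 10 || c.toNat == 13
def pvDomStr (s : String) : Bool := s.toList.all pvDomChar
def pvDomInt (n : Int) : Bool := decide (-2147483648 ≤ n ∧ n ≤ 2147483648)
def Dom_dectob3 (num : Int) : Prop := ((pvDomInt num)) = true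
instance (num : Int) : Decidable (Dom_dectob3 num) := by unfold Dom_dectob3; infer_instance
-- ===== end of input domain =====

-- B replaces A's telescoping sum of shifted prefixes with a two-phase
-- conversion (collect base-3 digits, then fold them into the decimal
-- readout); objective: idiomatic, same cost.

-- ===== PORT A =====
-- A's `int(N / 3)` truncates the float quotient toward zero; on the domain
-- (|N| ≤ 2^31) the float quotient is accurate enough that this equals
-- truncating integer division, ported as Int.tdiv.
def dectob3_loopA (N val : Int) (p : Nat) : Int :=
  if _h : 0 < N then
    dectob3_loopA (N.tdiv 3) (val + (N.tdiv 3) * 7 * 10 ^ p) (p + 1)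
  else val
termination_by N.toNat
decreasing_by
  have h3 : N.tdiv 3 = N / 3 := Int.tdiv_eq_ediv_of_nonneg (by omega)
  rw [h3]; omega

-- num < 0: Python A returns the string 'Invalid number' (not an Int);
-- excluded by Pre_dectob3, placeholder 0 here.
def dectob3 (num : Int) : Int :=
  if num < 0 then 0
  else num + dectob3_loopA (num.tdiv 3) ((num.tdiv 3) * 7) 1

-- ===== PORT B =====
-- phase 1 of Source B: the base-3 digits of n, least significant first
-- (`n % 3` / `n //= 3` with positive divisor = Lean's ediv/emod).
def b3digits (n : Int) : List Int :=
  if _h : 0 < n then n % 3 :: b3digits (n / 3) else []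
termination_by n.toNat
decreasing_by omega

def dectob3_alt (num : Int) : Int :=
  if num < 0 then 0
  else (b3digits num).reverse.foldl (fun r d => r * 10 + d) 0

-- ===== PRECONDITION & SPEC =====
-- Pre_ excludes num < 0, where Python A returns the string 'Invalid number'
-- instead of an Int (outside the declared return type).
def Pre_dectob3 (num : Int) : Prop := 0 ≤ num
instance (num : Int) : Decidable (Pre_dectob3 num) := by unfold Pre_dectob3; infer_instance
def pvWitness_dectob3 : Int := (5)

def Spec_dectob3 (num : Int) (out : Int) : Prop := out = dectob3_alt num
instance (num : Int) (out : Int) : Decidable (Spec_dectob3 num out) := by unfold Spec_dectob3; infer_instance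

-- ===== CLAIM (what is proved, stated in full; the proofs are below) =====
def Claim_equal_dectob3 : Prop := ∀ (num : Int), Dom_dectob3 num → Pre_dectob3 num → Spec_dectob3 num (dectob3 num)

-- ===== LEMMAS AND PROOFS =====

theorem loopA_shift (k : Nat) : ∀ (N : Int), N.toNat ≤ k → ∀ (v : Int) (p : Nat),
    dectob3_loopA N v p = v + 10 ^ p * dectob3_loopA N 0 0 := by
  induction k with
  | zero =>
    intro N h v p
    have hN : ¬ 0 < N := by omega
    rw [dectob3_loopA]
    conv_rhs => rw [dectob3_loopA]
    simp [hN]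
  | succ k ih =>
    intro N h v p
    by_cases hN : 0 < N
    · have h3 : N.tdiv 3 = N / 3 := Int.tdiv_eq_ediv_of_nonneg (by omega)
      have hle : (N.tdiv 3).toNat ≤ k := by rw [h3]; omega
      rw [dectob3_loopA]
      conv_rhs => rw [dectob3_loopA]
      simp only [hN, dif_pos]
      rw [ih _ hle (v + N.tdiv 3 * 7 * 10 ^ p) (p + 1),
          ih _ hle (0 + N.tdiv 3 * 7 * 10 ^ 0) 1]
      ring
    · rw [dectob3_loopA]
      conv_rhs => rw [dectob3_loopA]
      simp [hN]

-- one unfolding of loopA's accumulator-free form, valid for all 0 ≤ m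
theorem loopA_unfold1 (m : Int) (hm : 0 ≤ m) :
    dectob3_loopA m 0 0 = (m.tdiv 3) * 7 + 10 * dectob3_loopA (m.tdiv 3) 0 0 := by
  by_cases h : 0 < m
  · rw [dectob3_loopA]
    simp only [h, dif_pos]
    rw [loopA_shift (m.tdiv 3).toNat _ le_rfl (0 + m.tdiv 3 * 7 * 10 ^ 0) 1]
    ring
  · have hm0 : m = 0 := by omega
    subst hm0
    have : (0 : Int).tdiv 3 = 0 := by decide
    rw [this]
    rw [dectob3_loopA]
    simp

theorem loopAB (k : Nat) : ∀ (n : Int), n.toNat ≤ k → 0 ≤ n →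
    n + dectob3_loopA (n.tdiv 3) ((n.tdiv 3) * 7) 1
      = (b3digits n).reverse.foldl (fun r d => r * 10 + d) 0 := by
  induction k with
  | zero =>
    intro n h hn
    have hn0 : n = 0 := by omega
    subst hn0
    have h0 : (0 : Int).tdiv 3 = 0 := by decide
    rw [h0, dectob3_loopA, b3digits]
    simp
  | succ k ih =>
    intro n h hn
    by_cases hpos : 0 < n
    · have h3 : n.tdiv 3 = n / 3 := Int.tdiv_eq_ediv_of_nonneg hn
      have hm0 : 0 ≤ n.tdiv 3 := by rw [h3]; omega
      have hmk : (n.tdiv 3).toNat ≤ k := by rw [h3]; omega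
      -- unfold B's digit list once; folding over `rev ++ [n % 3]`
      conv_rhs => rw [b3digits]
      simp only [hpos, dif_pos, List.reverse_cons, List.foldl_append, List.foldl_cons,
        List.foldl_nil]
      rw [← h3, ← ih _ hmk hm0]
      -- rewrite A's side via shift and one unfolding
      rw [loopA_shift (n.tdiv 3).toNat _ le_rfl (n.tdiv 3 * 7) 1,
          loopA_unfold1 _ hm0,
          loopA_shift ((n.tdiv 3).tdiv 3).toNat _ le_rfl ((n.tdiv 3).tdiv 3 * 7) 1]
      have hmod : n % 3 = n - 3 * n.tdiv 3 := by rw [h3]; omega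
      rw [hmod]
      ring
    · have hn0 : n = 0 := by omega
      subst hn0
      have h0 : (0 : Int).tdiv 3 = 0 := by decide
      rw [h0, dectob3_loopA, b3digits]
      simp

-- ===== VERDICT (by name: the statement is the Claim_ definition above) =====
theorem dectob3_spec : Claim_equal_dectob3 := by
  intro num _ hpre
  unfold Spec_dectob3 dectob3 dectob3_alt
  have hlt : ¬ num < 0 := by exact not_lt.mpr hpre
  simp only [hlt, if_false]
  exact loopAB num.toNat num le_rfl hpre
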